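-- pv_equiv track=rewrite | github.com/StephaneBah/whisper_afrorad_training | src/afrorad_pipeline/data_pipeline.py | _is_manifest_match
-- ===== SOURCE A (Python) =====
-- def _normalize_relpath(value: str) -> str:
--     normalized = value.strip().replace("\\", "/")
--     normalized = normalized.lstrip("./")
--     normalized = normalized.lstrip("/")
--     return normalized
--
-- def _is_manifest_match(sample_path: str, allowed_paths: set[str]) -> bool:
--     sample = _normalize_relpath(sample_path)
--     if not sample:
--         return False
--
--     for allowed in allowed_paths:
--         if sample == allowed or sample.endswith(f"/{allowed}"):
--             return True
--     return False
-- ===== SOURCE B (Python) =====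
-- def _normalize_relpath(value: str) -> str:
--     normalized = value.strip().replace("\\", "/")
--     normalized = normalized.lstrip("./")
--     normalized = normalized.lstrip("/")
--     return normalized
--
-- def _is_manifest_match(sample_path: str, allowed_paths: set[str]) -> bool:
--     sample = _normalize_relpath(sample_path)
--     if not sample:
--         return False
--     if sample in allowed_paths:
--         return True
--     for i, ch in enumerate(sample):
--         if ch == "/" and sample[i + 1:] in allowed_paths:
--             return True
--     return False
-- ===== Notes on version B (the rewrite author's own statement) =====
-- stated objective: alternative
-- what changed: Instead of scanning every allowed path and running an endswith test on each, B enumerates the sample's slash-boundary suffixes once and tests each for membership in the allowed set.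
import Mathlib
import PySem

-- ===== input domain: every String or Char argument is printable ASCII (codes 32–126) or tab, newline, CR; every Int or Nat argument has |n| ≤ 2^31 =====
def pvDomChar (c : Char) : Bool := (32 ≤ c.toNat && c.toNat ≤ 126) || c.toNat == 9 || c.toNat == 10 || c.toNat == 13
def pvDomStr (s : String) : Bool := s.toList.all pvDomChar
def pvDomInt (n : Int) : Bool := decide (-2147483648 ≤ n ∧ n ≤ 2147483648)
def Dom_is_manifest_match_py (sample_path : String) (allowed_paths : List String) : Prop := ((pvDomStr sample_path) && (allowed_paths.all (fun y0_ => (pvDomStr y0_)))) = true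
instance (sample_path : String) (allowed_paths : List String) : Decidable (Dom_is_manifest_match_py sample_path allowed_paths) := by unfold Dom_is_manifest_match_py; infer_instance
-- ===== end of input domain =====

-- B replaces A's scan over every allowed path (endswith test each) by one scan over the
-- sample's slash boundaries, testing each slash-suffix for membership in the allowed set
-- (objective: alternative algorithm, same measured cost).

-- ===== PORT A =====
-- value.lstrip(chars): PySem has no left-only strip with a char set; ported by hand,
-- exact: drop leading characters that occur in `chars`.
def pvLstripChars (cs chars : List Char) : List Char :=
  cs.dropWhile (fun c => chars.contains c)

-- _normalize_relpath, shared verbatim by both Pythons (helper of both A and B)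
def pvNormalize (value : String) : List Char :=
  let n := PySem.Chars.replace (PySem.Chars.strip value.toList) ['\\'] ['/']
  let n := pvLstripChars n ['.', '/']
  pvLstripChars n ['/']

def is_manifest_match_py (sample_path : String) (allowed_paths : List String) : Bool :=
  let sample := pvNormalize sample_path
  if sample.isEmpty then false
  else
    allowed_paths.any (fun allowed =>
      sample == allowed.toList || PySem.Chars.endswith sample ('/' :: allowed.toList))

-- ===== PORT B =====
def is_manifest_match_py_alt (sample_path : String) (allowed_paths : List String) : Bool :=
  let sample := pvNormalize sample_path
  if sample.isEmpty then false
  else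
    let aset := allowed_paths.map String.toList
    aset.contains sample
      || (PySem.List.enumerate sample 0).any (fun p =>
            p.2 == '/' && aset.contains (PySem.List.slice sample (some (p.1 + 1)) none))

-- ===== PRECONDITION & SPEC =====
def Spec_is_manifest_match_py (sample_path : String) (allowed_paths : List String) (out : Bool) : Prop := out = is_manifest_match_py_alt sample_path allowed_paths
instance (sample_path : String) (allowed_paths : List String) (out : Bool) : Decidable (Spec_is_manifest_match_py sample_path allowed_paths out) := by unfold Spec_is_manifest_match_py; infer_instance

-- ===== CLAIM (what is proved, stated in full; the proofs are below) =====
def Claim_equal_is_manifest_match_py : Prop := ∀ (sample_path : String) (allowed_paths : List String), Dom_is_manifest_match_py sample_path allowed_paths → Spec_is_manifest_match_py sample_path allowed_paths (is_manifest_match_py sample_path allowed_paths)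

-- ===== LEMMAS AND PROOFS =====

-- a nonempty string is a suffix exactly when its head sits at some index and the rest follows
lemma pv_cons_suffix_iff (c : Char) (a cs : List Char) :
    (c :: a) <:+ cs ↔ ∃ k, cs[k]? = some c ∧ cs.drop (k + 1) = a := by
  constructor
  · rintro ⟨t, rfl⟩
    refine ⟨t.length, ?_, ?_⟩ <;> simp
  · rintro ⟨k, hk, hd⟩
    rw [List.getElem?_eq_some_iff] at hk
    obtain ⟨hlt, hget⟩ := hk
    refine ⟨cs.take k, ?_⟩
    have h := List.take_append_drop k cs
    rw [List.drop_eq_getElem_cons hlt, hget, hd] at h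
    exact h

lemma pv_any_enumerate_iff (cs : List Char) (f : Int → Char → Bool) :
    (PySem.List.enumerate cs 0).any (fun p => f p.1 p.2) = true
      ↔ ∃ (k : Nat), ∃ (h : k < cs.length), f k cs[k] = true := by
  simp only [List.any_eq_true, PySem.List.mem_enumerate_iff]
  constructor
  · rintro ⟨p, ⟨k, h, rfl⟩, hf⟩
    exact ⟨k, h, by simpa using hf⟩
  · rintro ⟨k, h, hf⟩
    exact ⟨(k, cs[k]), ⟨k, h, by simp⟩, by simpa using hf⟩

lemma pv_slice_succ (cs : List Char) (k : Nat) :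
    PySem.List.slice cs (some ((k : Int) + 1)) none = cs.drop (k + 1) := by
  have : ((k : Int) + 1) = ((k + 1 : Nat) : Int) := by push_cast; ring
  rw [this, PySem.List.slice_from_natCast]

lemma pv_any_enum_spec (cs : List Char) (Q : List Char → Bool) :
    ((PySem.List.enumerate cs 0).any (fun p =>
        p.2 == '/' && Q (PySem.List.slice cs (some (p.1 + 1)) none)) = true)
      ↔ ∃ (k : Nat), ∃ (_ : k < cs.length), cs[k] = '/' ∧ Q (cs.drop (k + 1)) = true := by
  rw [pv_any_enumerate_iff cs
    (fun i c => c == '/' && Q (PySem.List.slice cs (some (i + 1)) none))]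
  simp only [Bool.and_eq_true, beq_iff_eq, pv_slice_succ]

lemma pv_match_loop_eq (cs : List Char) (ap : List String) :
    ap.any (fun a => cs == a.toList || PySem.Chars.endswith cs ('/' :: a.toList))
    = ((ap.map String.toList).contains cs
       || (PySem.List.enumerate cs 0).any (fun p =>
            p.2 == '/' && (ap.map String.toList).contains
              (PySem.List.slice cs (some (p.1 + 1)) none))) := by
  rw [Bool.eq_iff_iff, Bool.or_eq_true,
    pv_any_enum_spec cs ((ap.map String.toList).contains ·)]
  simp only [List.any_eq_true, Bool.or_eq_true, beq_iff_eq, PySem.Chars.endswith_iff,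
    pv_cons_suffix_iff, List.contains_eq_mem, List.mem_map, decide_eq_true_eq]
  constructor
  · rintro ⟨a, ha, hcase⟩
    rcases hcase with heq | ⟨j, hj, hd⟩
    · exact Or.inl ⟨a, ha, heq.symm⟩
    · rw [List.getElem?_eq_some_iff] at hj
      obtain ⟨hlt, hget⟩ := hj
      exact Or.inr ⟨j, hlt, hget, a, ha, hd.symm⟩
  · rintro (⟨a, ha, heq⟩ | ⟨k, hlt, hget, a, ha, hd⟩)
    · exact ⟨a, ha, Or.inl heq.symm⟩
    · exact ⟨a, ha, Or.inr ⟨k, by rw [List.getElem?_eq_some_iff]; exact ⟨hlt, hget⟩, hd.symm⟩⟩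

-- ===== VERDICT (by name: the statement is the Claim_ definition above) =====
theorem is_manifest_match_py_spec : Claim_equal_is_manifest_match_py := by
  intro sample_path allowed_paths _
  unfold Spec_is_manifest_match_py is_manifest_match_py is_manifest_match_py_alt
  by_cases h : (pvNormalize sample_path).isEmpty <;>
    simp only [h, if_true, if_false, Bool.false_eq_true]
  exact pv_match_loop_eq (pvNormalize sample_path) allowed_paths
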